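-- pv_equiv track=rewrite | github.com/aoncevay/agent-mt | data/irs_to_process/build_doc_parallel_corpus.py | contains_table_or_image
-- ===== SOURCE A (Python) =====
-- def contains_table_or_image(text: str) -> bool:
--     """
--     Check if text contains tables (2+ pipes | ... |) or images (!This is an Image:).
--     Returns True if the section should be skipped.
--     """
--     if not text:
--         return False
--
--     # Check for images
--     if "!This is an Image:" in text:
--         return True
--
--     # Check for tables: look for lines with 2 or more pipes
--     lines = text.split('\n')
--     for line in lines:
--         # Count pipes in the line
--         pipe_count = line.count('|')
--         if pipe_count >= 2:
--             return True
--
--     return False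
-- ===== SOURCE B (Python) =====
-- def contains_table_or_image(text: str) -> bool:
--     """
--     Check if text contains tables (2+ pipes | ... |) or images (!This is an Image:).
--     Returns True if the section should be skipped.
--     """
--     if not text:
--         return False
--     if "!This is an Image:" in text:
--         return True
--     # Single pass over the characters: a table line is two pipes with no
--     # newline between them.
--     pipe_seen = False
--     for ch in text:
--         if ch == '\n':
--             pipe_seen = False
--         elif ch == '|':
--             if pipe_seen:
--                 return True
--             pipe_seen = True
--     return False
-- ===== Notes on version B (the rewrite author's own statement) =====
-- stated objective: alternative
-- what changed: Replaces the split('\n') into lines plus per-line pipe counting with a single character-level scan carrying a 'pipe seen since last newline' flag that returns True on the second pipe of a line.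
import Mathlib
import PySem

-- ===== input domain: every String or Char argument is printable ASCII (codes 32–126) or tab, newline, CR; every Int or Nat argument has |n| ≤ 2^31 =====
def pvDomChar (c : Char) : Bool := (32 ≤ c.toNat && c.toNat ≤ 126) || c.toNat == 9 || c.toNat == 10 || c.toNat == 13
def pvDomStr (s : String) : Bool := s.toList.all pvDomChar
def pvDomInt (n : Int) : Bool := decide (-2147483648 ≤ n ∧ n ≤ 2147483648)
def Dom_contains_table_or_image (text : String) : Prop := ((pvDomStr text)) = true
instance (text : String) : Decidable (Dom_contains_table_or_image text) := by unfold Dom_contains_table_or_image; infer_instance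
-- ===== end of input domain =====

-- B replaces the split-into-lines loop with per-line pipe counting by a single
-- character scan carrying a "pipe seen since last newline" flag (alternative
-- decomposition, same cost).

-- ===== PORT A =====
-- A's 'for line in lines: if line.count('|') >= 2: return True' loop
def pvLinesLoop : List (List Char) → Bool
  | [] => false
  | line :: rest =>
    if 2 ≤ PySem.Chars.count line ['|'] then true else pvLinesLoop rest

def contains_table_or_image (text : String) : Bool :=
  if text.toList = [] then false
  else if PySem.Chars.isIn "!This is an Image:".toList text.toList then true
  else pvLinesLoop (PySem.Chars.splitOn text.toList ['\n'])

-- ===== PORT B =====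
-- B's single pass: flag = "a pipe was seen on the current line"
def pvScan : List Char → Bool → Bool
  | [], _ => false
  | c :: rest, seen =>
    if c = '\n' then pvScan rest false
    else if c = '|' then (if seen then true else pvScan rest true)
    else pvScan rest seen

def contains_table_or_image_alt (text : String) : Bool :=
  if text.toList = [] then false
  else if PySem.Chars.isIn "!This is an Image:".toList text.toList then true
  else pvScan text.toList false

-- ===== PRECONDITION & SPEC =====
def Spec_contains_table_or_image (text : String) (out : Bool) : Prop := out = contains_table_or_image_alt text
instance (text : String) (out : Bool) : Decidable (Spec_contains_table_or_image text out) := by unfold Spec_contains_table_or_image; infer_instance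

-- ===== CLAIM (what is proved, stated in full; the proofs are below) =====
def Claim_equal_contains_table_or_image : Prop := ∀ (text : String), Dom_contains_table_or_image text → Spec_contains_table_or_image text (contains_table_or_image text)

-- ===== LEMMAS AND PROOFS =====

-- reference single-char split (proof-only)
def pvSplit : List Char → List Char → List (List Char)
  | [], cur => [cur.reverse]
  | c :: rest, cur =>
    if c = '\n' then cur.reverse :: pvSplit rest [] else pvSplit rest (c :: cur)

theorem pvCountGo_single (fuel : ℕ) :
    ∀ (l : List Char) (acc : ℕ), l.length ≤ fuel →
      PySem.Chars.count.go ['|'] fuel l acc = acc + l.count '|' := by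
  induction fuel with
  | zero =>
    intro l acc h
    have hl : l = [] := List.eq_nil_of_length_eq_zero (Nat.le_zero.mp h)
    subst hl
    simp [PySem.Chars.count.go]
  | succ n ih =>
    intro l acc h
    cases l with
    | nil => simp [PySem.Chars.count.go]
    | cons c rest =>
      simp only [List.length_cons] at h
      by_cases hc : c = '|'
      · subst hc
        have hstep : PySem.Chars.count.go ['|'] (n + 1) ('|' :: rest) acc
            = PySem.Chars.count.go ['|'] n rest (acc + 1) := by
          simp [PySem.Chars.count.go, List.isPrefixOf]
        rw [hstep, ih rest (acc + 1) (by omega)]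
        simp [List.count_cons]
        omega
      · have hstep : PySem.Chars.count.go ['|'] (n + 1) (c :: rest) acc
            = PySem.Chars.count.go ['|'] n rest acc := by
          simp [PySem.Chars.count.go, List.isPrefixOf, Ne.symm hc]
        rw [hstep, ih rest acc (by omega)]
        simp [List.count_cons, hc]

theorem pvCount_single (l : List Char) :
    PySem.Chars.count l ['|'] = l.count '|' := by
  have := pvCountGo_single l.length l 0 (le_refl _)
  simpa [PySem.Chars.count] using this

theorem pvSplitGo (fuel : ℕ) :
    ∀ (l cur : List Char) (acc : List (List Char)), l.length ≤ fuel →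
      PySem.Chars.splitOn.go ['\n'] fuel l cur acc = acc.reverse ++ pvSplit l cur := by
  induction fuel with
  | zero =>
    intro l cur acc h
    have hl : l = [] := List.eq_nil_of_length_eq_zero (Nat.le_zero.mp h)
    subst hl
    simp [PySem.Chars.splitOn.go, pvSplit]
  | succ n ih =>
    intro l cur acc h
    cases l with
    | nil => simp [PySem.Chars.splitOn.go, pvSplit]
    | cons c rest =>
      simp only [List.length_cons] at h
      by_cases hc : c = '\n'
      · subst hc
        have hstep : PySem.Chars.splitOn.go ['\n'] (n + 1) ('\n' :: rest) cur acc
            = PySem.Chars.splitOn.go ['\n'] n rest [] (cur.reverse :: acc) := by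
          simp [PySem.Chars.splitOn.go, List.isPrefixOf]
        rw [hstep, ih rest [] (cur.reverse :: acc) (by omega)]
        simp [pvSplit]
      · have hstep : PySem.Chars.splitOn.go ['\n'] (n + 1) (c :: rest) cur acc
            = PySem.Chars.splitOn.go ['\n'] n rest (c :: cur) acc := by
          simp [PySem.Chars.splitOn.go, List.isPrefixOf, Ne.symm hc]
        rw [hstep, ih rest (c :: cur) acc (by omega)]
        simp [pvSplit, hc]

theorem pvSplitOn_eq (l : List Char) :
    PySem.Chars.splitOn l ['\n'] = pvSplit l [] := by
  have := pvSplitGo (l.length + 1) l [] [] (by omega)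
  simpa [PySem.Chars.splitOn] using this

theorem pvLinesLoop_eq_any (xs : List (List Char)) :
    pvLinesLoop xs = xs.any (fun ln => decide (2 ≤ ln.count '|')) := by
  induction xs with
  | nil => simp [pvLinesLoop]
  | cons line rest ih =>
    simp only [pvLinesLoop, pvCount_single, List.any_cons]
    by_cases h : 2 ≤ line.count '|'
    · simp [h]
    · simp [h, ih]

theorem pvSplit_any_of_two (l : List Char) :
    ∀ cur : List Char, 2 ≤ cur.count '|' →
      (pvSplit l cur).any (fun ln => decide (2 ≤ ln.count '|')) = true := by
  induction l with
  | nil =>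
    intro cur h
    simp [pvSplit, List.count_reverse, h]
  | cons c rest ih =>
    intro cur h
    by_cases hc : c = '\n'
    · subst hc
      simp [pvSplit, List.count_reverse, h]
    · simp only [pvSplit, if_neg hc]
      apply ih
      simp [List.count_cons]
      omega

theorem pvSplit_any_eq_scan (l : List Char) :
    ∀ cur : List Char, cur.count '|' ≤ 1 →
      (pvSplit l cur).any (fun ln => decide (2 ≤ ln.count '|')) =
        pvScan l (decide (1 ≤ cur.count '|')) := by
  induction l with
  | nil =>
    intro cur h
    simp only [pvSplit, pvScan, List.any_cons, List.any_nil, Bool.or_false]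
    simp [List.count_reverse]
    omega
  | cons c rest ih =>
    intro cur h
    by_cases hn : c = '\n'
    · subst hn
      have hsplit : pvSplit ('\n' :: rest) cur = cur.reverse :: pvSplit rest [] := by
        simp [pvSplit]
      have hscan : ∀ b : Bool, pvScan ('\n' :: rest) b = pvScan rest false := by
        intro b; simp [pvScan]
      rw [hsplit, hscan, List.any_cons, ih [] (by simp)]
      have h2 : decide (2 ≤ cur.reverse.count '|') = false := by
        simp [List.count_reverse]; omega
      rw [h2]
      simp
    · by_cases hp : c = '|'
      · subst hp
        have hne : ('|' : Char) ≠ '\n' := by decide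
        have hsplit : pvSplit ('|' :: rest) cur = pvSplit rest ('|' :: cur) := by
          simp [pvSplit, hne]
        rw [hsplit]
        by_cases h1 : 1 ≤ cur.count '|'
        · have h2 : 2 ≤ ('|' :: cur).count '|' := by
            rw [List.count_cons_self]; omega
          rw [pvSplit_any_of_two rest _ h2]
          simp [pvScan, hne, h1]
        · rw [ih ('|' :: cur) (by rw [List.count_cons_self]; omega)]
          have hc1 : ('|' :: cur).count '|' = 1 := by
            rw [List.count_cons_self]; omega
          have hc0 : cur.count '|' = 0 := by omega
          simp [pvScan, hne, hc1, hc0]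
      · have hsplit : pvSplit (c :: rest) cur = pvSplit rest (c :: cur) := by
          simp [pvSplit, hn]
        have hcount : (c :: cur).count '|' = cur.count '|' := by
          simp [List.count_cons, hp]
        rw [hsplit, ih (c :: cur) (by rw [hcount]; exact h)]
        rw [hcount]
        simp [pvScan, hn, hp]

theorem pvLoop_eq_scan (l : List Char) :
    pvLinesLoop (PySem.Chars.splitOn l ['\n']) = pvScan l false := by
  rw [pvLinesLoop_eq_any, pvSplitOn_eq, pvSplit_any_eq_scan l [] (by simp)]
  simp

-- ===== VERDICT (by name: the statement is the Claim_ definition above) =====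
theorem contains_table_or_image_spec : Claim_equal_contains_table_or_image := by
  intro text _
  unfold Spec_contains_table_or_image contains_table_or_image contains_table_or_image_alt
  split_ifs with h1 h2
  · rfl
  · rfl
  · exact pvLoop_eq_scan text.toList
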